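-- pv_equiv track=rewrite | github.com/Marc416/ndb_algorithm | AlgorithmStudy/Part3/1. 그리디/6. 무지의 먹방라이브 - 있는 음식수.py | solution
-- ===== SOURCE A (Python) =====
-- def solution(food_times, k):
--     for idx, value in enumerate(food_times):
--         food_times[idx] = [idx, value]
--
--     time = 0
--
--     while True:
--         if sum(map(lambda x: x[1], food_times)) > k:
--             idx, value = min(food_times, key=lambda x: x[1])
--             food_count = len(food_times)
--             time += food_count
--             food_times.remove([idx, value])
--         else:
--             for value in food_times[:]:
--                 if time == k:
--                     if value[1] <= 0:
--                         return -1
--                     answer = value[0] + 1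
--                     return answer
--
--                 value[1] -= 1
--                 if value[1] == 0:
--                     food_times.remove(value)
--                 time += 1
-- ===== SOURCE B (Python) =====
-- def solution(food_times, k):
--     # Sort once to run the removal phase as a prefix walk; then advance the
--     # round-robin whole rounds at a time instead of one second at a time.
--     n = len(food_times)
--     pairs = list(enumerate(food_times))
--     order = sorted(pairs, key=lambda p: (p[1], p[0]))
--
--     # removal phase: while the remaining total exceeds k, drop the smallest food
--     total = sum(food_times)
--     time = 0
--     removed = []
--     for p in order:
--         if total <= k:
--             break
--         time += n - len(removed)
--         total -= p[1]
--         removed.append(p)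
--     rem = [p for p in pairs if p not in removed]
--
--     # round-robin phase: take whole rounds while they fit before second k
--     while time + len(rem) <= k:
--         time += len(rem)
--         rem = [(i, v - 1) for i, v in rem if v != 1]
--
--     i, v = rem[k - time]
--     return -1 if v <= 0 else i + 1
-- ===== Notes on version B (the rewrite author's own statement) =====
-- stated objective: alternative
-- what changed: Replaces A's repeated min()+remove() scans and its per-second in-place round-robin mutation by one sort of the index/time pairs with a prefix walk for the removal phase, and a round-at-a-time rebuild of the remaining foods that indexes directly into the round where second k falls.
import Mathlib
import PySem

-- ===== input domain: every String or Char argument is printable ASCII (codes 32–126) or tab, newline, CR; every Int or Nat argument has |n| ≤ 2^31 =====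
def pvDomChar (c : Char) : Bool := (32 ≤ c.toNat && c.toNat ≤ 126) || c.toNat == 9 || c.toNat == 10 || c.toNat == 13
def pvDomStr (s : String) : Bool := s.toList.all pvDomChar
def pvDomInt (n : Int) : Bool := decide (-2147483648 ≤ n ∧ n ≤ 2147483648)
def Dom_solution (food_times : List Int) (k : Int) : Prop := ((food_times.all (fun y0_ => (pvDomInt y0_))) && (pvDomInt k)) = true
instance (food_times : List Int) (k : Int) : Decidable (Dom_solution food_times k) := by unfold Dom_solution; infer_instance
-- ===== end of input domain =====

-- B replaces A's repeated min()+remove() scans and its per-second in-place round-robin mutation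
-- by one sort with a prefix walk for the removal phase and a round-at-a-time rebuild of the
-- remaining foods (equivalence is about the RETURN value only: A overwrites its food_times
-- argument in place, B does not mutate it).

-- ===== PORT A =====
def pvSumVals (L : List (Int × Int)) : Int := (L.map (fun x => x.2)).sum

-- the inner 'for value in food_times[:]' pass: .inl = early return, .inr = (new list, new time)
def pvPassA (k : Int) : List (Int × Int) → Int → Sum Int (List (Int × Int) × Int)
  | [], time => .inr ([], time)
  | p :: rest, time =>
    if time = k then .inl (if p.2 ≤ 0 then -1 else p.1 + 1)
    else
      match pvPassA k rest (time + 1) with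
      | .inl a => .inl a
      | .inr (l, t) => .inr (if p.2 - 1 = 0 then (l, t) else ((p.1, p.2 - 1) :: l, t))

-- the 'while True' loop; the fuel only bounds the number of iterations (A can loop forever;
-- inside Pre_solution the fuel chosen in 'solution' is proved sufficient)
def pvLoopA (k : Int) : Nat → List (Int × Int) → Int → Int
  | 0, _, _ => 0
  | fuel + 1, L, time =>
    if pvSumVals L > k then
      match PySem.List.min? L (fun x => x.2) with
      | none => 0          -- min() of an empty list: ValueError in A (outside Pre_solution)
      | some m => pvLoopA k fuel (L.erase m) (time + (L.length : Int))
    else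
      match pvPassA k L time with
      | .inl a => a
      | .inr (L', t') => pvLoopA k fuel L' t'

def solution (food_times : List Int) (k : Int) : Int :=
  pvLoopA k (food_times.length + k.toNat + 2) (PySem.List.enumerate food_times) 0

-- ===== PORT B =====
-- removal-phase 'for p in order' loop with its break
def pvPhase1B (k n : Int) : List (Int × Int) → Int → Int → List (Int × Int) → Int × List (Int × Int)
  | [], time, _total, removed => (time, removed)
  | p :: t, time, total, removed =>
    if total ≤ k then (time, removed)
    else pvPhase1B k n t (time + (n - (removed.length : Int))) (total - p.2) (removed ++ [p])

-- the 'while time + len(rem) <= k' round loop; the fuel only bounds the number of rounds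
-- (Source B can loop forever; inside Pre_solution the fuel chosen in 'solution_alt' is proved sufficient)
def pvPhase2B (k : Int) : Nat → List (Int × Int) → Int → List (Int × Int) × Int
  | 0, rem, time => (rem, time)
  | fuel + 1, rem, time =>
    if time + (rem.length : Int) ≤ k then
      pvPhase2B k fuel (rem.filterMap (fun p => if p.2 = 1 then none else some (p.1, p.2 - 1)))
        (time + (rem.length : Int))
    else (rem, time)

def solution_alt (food_times : List Int) (k : Int) : Int :=
  let n : Int := (food_times.length : Int)
  let pairs := PySem.List.enumerate food_times
  let order := PySem.List.sorted2 pairs (fun p => p.2) (fun p => p.1) false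
  let tr := pvPhase1B k n order 0 food_times.sum []
  let rem := pairs.filter (fun p => !(tr.2.contains p))
  let s := pvPhase2B k (k.toNat + 1) rem tr.1
  match PySem.List.pyGet? s.1 (k - s.2) with
  | none => 0    -- IndexError in Source B (outside Pre_solution)
  | some pv => if pv.2 ≤ 0 then -1 else pv.1 + 1

-- ===== PRECONDITION & SPEC =====
def pvSortedVals (ft : List Int) : List Int := PySem.List.sorted ft (fun v => v) false
def pvT0 (n r : Nat) : Int := ((List.range r).map (fun i => (n : Int) - (i : Int))).sum

-- Pre_solution = exactly the inputs on which A returns: k ≥ 0, and with r = the number of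
-- removal-phase removals (first r whose remaining-sum is ≤ k) the remaining round-robin phase
-- actually reaches second k (A raises ValueError for k < 0 and loops forever otherwise).
def Pre_solution (food_times : List Int) (k : Int) : Prop :=
  0 ≤ k ∧ ∃ r ≤ food_times.length,
    ((pvSortedVals food_times).drop r).sum ≤ k ∧
    (∀ r' < r, k < ((pvSortedVals food_times).drop r').sum) ∧
    pvT0 food_times.length r ≤ k ∧
    ((∃ v ∈ (pvSortedVals food_times).drop r, v ≤ 0) ∨
      k < pvT0 food_times.length r + ((pvSortedVals food_times).drop r).sum)

instance (food_times : List Int) (k : Int) : Decidable (Pre_solution food_times k) := by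
  unfold Pre_solution; infer_instance

def pvWitness_solution : List Int × Int := ([3, 1, 2], 5)

def Spec_solution (food_times : List Int) (k : Int) (out : Int) : Prop := out = solution_alt food_times k
instance (food_times : List Int) (k : Int) (out : Int) : Decidable (Spec_solution food_times k out) := by unfold Spec_solution; infer_instance

-- ===== CLAIM (what is proved, stated in full; the proofs are below) =====
def Claim_equal_solution : Prop := ∀ (food_times : List Int) (k : Int), Dom_solution food_times k → Pre_solution food_times k → Spec_solution food_times k (solution food_times k)


-- ===== LEMMAS AND PROOFS =====

-- proof-side abbreviations (definitionally equal to the sub-terms of the two ports)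
def pvBlex (p q : Int × Int) : Bool := decide (p.2 < q.2) || (!decide (q.2 < p.2) && decide (p.1 < q.1))
def pvLexLe (p q : Int × Int) : Prop := p.2 < q.2 ∨ (p.2 = q.2 ∧ p.1 ≤ q.1)
def pvE (ft : List Int) : List (Int × Int) := PySem.List.enumerate ft
def pvOrd (ft : List Int) : List (Int × Int) := PySem.List.sorted2 (pvE ft) (fun p => p.2) (fun p => p.1) false
def pvRemF (ft : List Int) (done : List (Int × Int)) : List (Int × Int) := (pvE ft).filter (fun p => !(done.contains p))
def pvStep (L : List (Int × Int)) : List (Int × Int) := L.filterMap (fun p => if p.2 = 1 then none else some (p.1, p.2 - 1))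
def pvModel (rem : List (Int × Int)) (b : Nat) : List (Int × Int) :=
  rem.filterMap (fun p => if p.2 ≤ 0 ∨ (b : Int) < p.2 then some (p.1, p.2 - (b : Int)) else none)
def pvTB (rem : List (Int × Int)) (t0 : Int) (b : Nat) : Int :=
  t0 + ((List.range b).map (fun i => ((pvModel rem i).length : Int))).sum

-- enumerate facts
lemma pvEnum_snd (ft : List Int) : ∀ s : Int, (PySem.List.enumerate ft s).map Prod.snd = ft := by
  induction ft with
  | nil => intro s; simp [PySem.List.enumerate]
  | cons x t ih => intro s; simp [PySem.List.enumerate, ih]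
lemma pvEnum_len (ft : List Int) : ∀ s : Int, (PySem.List.enumerate ft s).length = ft.length := by
  induction ft with
  | nil => intro s; simp [PySem.List.enumerate]
  | cons x t ih => intro s; simp [PySem.List.enumerate, ih]

lemma pvEnum_lb (ft : List Int) : ∀ s : Int, ∀ p ∈ PySem.List.enumerate ft s, s ≤ p.1 := by
  induction ft with
  | nil => intro s p hp; simp [PySem.List.enumerate] at hp
  | cons x t ih =>
    intro s p hp
    simp only [PySem.List.enumerate, List.mem_cons] at hp
    rcases hp with h | h
    · subst h; simp
    · have := ih (s + 1) p h; omega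
lemma pvEnum_pairwise (ft : List Int) : ∀ s : Int, (PySem.List.enumerate ft s).Pairwise (fun a b => a.1 < b.1) := by
  induction ft with
  | nil => intro s; simp [PySem.List.enumerate]
  | cons x t ih =>
    intro s
    simp only [PySem.List.enumerate]
    refine List.Pairwise.cons ?_ (ih (s + 1))
    intro p hp
    have := pvEnum_lb t (s + 1) p hp
    simp; omega
lemma pvE_nodup (ft : List Int) : (pvE ft).Nodup := by
  have h := pvEnum_pairwise ft 0
  exact h.imp (fun {a b} hlt => by intro he; subst he; omega)

-- the sorted pair list pvOrd
lemma pvLexLe_trans {a b c : Int × Int} (h1 : pvLexLe a b) (h2 : pvLexLe b c) : pvLexLe a c := by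
  unfold pvLexLe at *; omega
lemma pvInsertBy_pairwise (x : Int × Int) (ys : List (Int × Int)) (h : ys.Pairwise pvLexLe) :
    (PySem.List.insertBy pvBlex x ys).Pairwise pvLexLe := by
  induction ys with
  | nil => simp [PySem.List.insertBy]
  | cons y ys ih =>
    rw [List.pairwise_cons] at h
    obtain ⟨hy, hys⟩ := h
    show (if pvBlex x y = true then x :: y :: ys else y :: PySem.List.insertBy pvBlex x ys).Pairwise pvLexLe
    split
    · rename_i hb
      have hxy : pvLexLe x y := by
        simp only [pvBlex, Bool.or_eq_true, Bool.and_eq_true, decide_eq_true_eq,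
          Bool.not_eq_true', decide_eq_false_iff_not] at hb
        unfold pvLexLe; omega
      refine List.Pairwise.cons ?_ (List.Pairwise.cons hy hys)
      intro z hz
      rcases List.mem_cons.1 hz with hz | hz
      · subst hz; exact hxy
      · exact pvLexLe_trans hxy (hy z hz)
    · rename_i hb
      have hyx : pvLexLe y x := by
        simp only [pvBlex, Bool.or_eq_true, Bool.and_eq_true, decide_eq_true_eq,
          Bool.not_eq_true', decide_eq_false_iff_not] at hb
        push Not at hb
        unfold pvLexLe; omega
      refine List.Pairwise.cons ?_ (ih hys)
      intro z hz
      rcases (PySem.List.insertBy_mem_iff _ _ _ _).1 hz with hz | hz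
      · subst hz; exact hyx
      · exact hy z hz
lemma pvOrd_eq_foldl (ft : List Int) :
    pvOrd ft = (pvE ft).foldl (fun acc x => PySem.List.insertBy pvBlex x acc) [] := rfl
lemma pvOrd_pairwise (ft : List Int) : (pvOrd ft).Pairwise pvLexLe := by
  rw [pvOrd_eq_foldl]
  have aux : ∀ (xs acc : List (Int × Int)), acc.Pairwise pvLexLe →
      (xs.foldl (fun acc x => PySem.List.insertBy pvBlex x acc) acc).Pairwise pvLexLe := by
    intro xs
    induction xs with
    | nil => intro acc h; exact h
    | cons x t ih => intro acc h; exact ih _ (pvInsertBy_pairwise x acc h)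
  exact aux _ [] (List.Pairwise.nil)
lemma pvOrd_perm (ft : List Int) : (pvOrd ft).Perm (pvE ft) := PySem.List.sorted2_perm _ _ _ _
lemma pvOrd_nodup (ft : List Int) : (pvOrd ft).Nodup := ((pvOrd_perm ft).nodup_iff).2 (pvE_nodup ft)
lemma pvOrd_snd (ft : List Int) : pvSortedVals ft = (pvOrd ft).map Prod.snd := by
  apply PySem.List.sorted_id_eq_of_perm_of_pairwise
  · have := (pvOrd_perm ft).map Prod.snd
    rw [show pvE ft = PySem.List.enumerate ft 0 from rfl, pvEnum_snd ft 0] at this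
    exact this
  · exact List.Pairwise.map _ (fun {a b} h => by unfold pvLexLe at h; omega) (pvOrd_pairwise ft)

-- first-extremal characterisation of Python min(..., key=...)
def pvPick (m y : Int × Int) : Int × Int := if y.2 < m.2 then y else m
lemma pvMin?_cons (x : Int × Int) (t : List (Int × Int)) :
    PySem.List.min? (x :: t) (fun p => p.2) = some (t.foldl pvPick x) := by
  induction t generalizing x with
  | nil => rfl
  | cons z t ih =>
    have h1 : PySem.List.min? (x :: z :: t) (fun p => p.2)
        = PySem.List.min? (pvPick x z :: t) (fun p => p.2) := by
      simp only [PySem.List.min?, List.foldl_cons]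
      congr 1
      show (if z.2 < x.2 then some z else some x) = some (pvPick x z)
      unfold pvPick; split <;> rfl
    rw [h1, ih (pvPick x z), List.foldl_cons]
lemma pvPick_keep : ∀ (t : List (Int × Int)) (m : Int × Int), (∀ z ∈ t, ¬ z.2 < m.2) → t.foldl pvPick m = m := by
  intro t
  induction t with
  | nil => intro m _; rfl
  | cons z t ih =>
    intro m h
    simp only [List.foldl_cons]
    rw [show pvPick m z = m from by unfold pvPick; rw [if_neg (h z (by simp))]]
    exact ih m (fun w hw => h w (by simp [hw]))
lemma pvPick_find : ∀ (t : List (Int × Int)) (acc m : Int × Int), m ∈ t → m.2 < acc.2 →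
    (∀ y ∈ t, m.2 ≤ y.2) → t.Pairwise (fun a b => a.1 < b.1) →
    (∀ y ∈ t, y.2 = m.2 → m.1 ≤ y.1) → t.foldl pvPick acc = m := by
  intro t
  induction t with
  | nil => intro acc m hm; simp at hm
  | cons z t ih =>
    intro acc m hm hlt hmin hpw htie
    rw [List.pairwise_cons] at hpw
    simp only [List.foldl_cons]
    rcases List.mem_cons.1 hm with hz | hz
    · subst hz
      rw [show pvPick acc m = m from by unfold pvPick; rw [if_pos hlt]]
      exact pvPick_keep t m (fun w hw h => by have := hmin w (by simp [hw]); omega)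
    · have hmz : m.2 < z.2 := by
        have h1 := hmin z (by simp)
        rcases lt_or_eq_of_le h1 with h | h
        · exact h
        · exact absurd (htie z (by simp) h.symm) (by have := hpw.1 m hz; omega)
      have : m.2 < (pvPick acc z).2 := by unfold pvPick; split <;> omega
      exact ih (pvPick acc z) m hz this (fun y hy => hmin y (by simp [hy])) hpw.2
        (fun y hy h => htie y (by simp [hy]) h)
lemma pvMin?_char (L : List (Int × Int)) (m : Int × Int) (hmem : m ∈ L)
    (hpw : L.Pairwise (fun a b => a.1 < b.1))
    (hmin : ∀ y ∈ L, m.2 ≤ y.2) (htie : ∀ y ∈ L, y.2 = m.2 → m.1 ≤ y.1) :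
    PySem.List.min? L (fun p => p.2) = some m := by
  cases L with
  | nil => simp at hmem
  | cons x t =>
    rw [pvMin?_cons]
    rw [List.pairwise_cons] at hpw
    rcases List.mem_cons.1 hmem with hx | hx
    · subst hx
      rw [pvPick_keep t m (fun z hz h => by have := hmin z (by simp [hz]); omega)]
    · have hmz : m.2 < x.2 := by
        have h1 := hmin x (by simp)
        rcases lt_or_eq_of_le h1 with h | h
        · exact h
        · exact absurd (htie x (by simp) h.symm) (by have := hpw.1 m hx; omega)
      rw [pvPick_find t x m hx hmz (fun y hy => hmin y (by simp [hy])) hpw.2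
        (fun y hy h => htie y (by simp [hy]) h)]

-- the removal-phase state: pvRemF ft (first r of pvOrd)
lemma pvRemF_pairwise_fst (ft : List Int) (done : List (Int × Int)) :
    (pvRemF ft done).Pairwise (fun a b => a.1 < b.1) := by
  exact List.Pairwise.sublist List.filter_sublist (pvEnum_pairwise ft 0)
lemma pvRemF_perm (ft : List Int) (r : Nat) :
    (pvRemF ft ((pvOrd ft).take r)).Perm ((pvOrd ft).drop r) := by
  have hperm : (pvE ft).Perm (pvOrd ft) := (pvOrd_perm ft).symm
  have h1 : (pvRemF ft ((pvOrd ft).take r)).Perm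
      ((pvOrd ft).filter (fun p => !(((pvOrd ft).take r).contains p))) :=
    hperm.filter _
  have hnd := pvOrd_nodup ft
  have hsplit := List.take_append_drop r (pvOrd ft)
  have hdisj : ∀ x ∈ (pvOrd ft).drop r, x ∉ (pvOrd ft).take r := by
    rw [← hsplit] at hnd
    have hdj := (List.nodup_append.1 hnd).2.2
    intro x hx hx'
    exact false_of_ne (hdj x hx' x hx)
  have h2 : (pvOrd ft).filter (fun p => !(((pvOrd ft).take r).contains p)) = (pvOrd ft).drop r := by
    conv_lhs => rw [← hsplit]
    rw [List.filter_append]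
    rw [List.filter_eq_nil_iff.2 (fun x hx => by simp; exact hx)]
    rw [List.filter_eq_self.2 (fun x hx => by simp; exact hdisj x hx)]
    simp
  rw [h2] at h1
  exact h1
lemma pvRemF_min (ft : List Int) (r : Nat) (hr : r < (pvOrd ft).length) :
    PySem.List.min? (pvRemF ft ((pvOrd ft).take r)) (fun p => p.2) = some ((pvOrd ft)[r]) := by
  have hdropcons : (pvOrd ft).drop r = (pvOrd ft)[r] :: (pvOrd ft).drop (r + 1) :=
    List.drop_eq_getElem_cons hr
  have hmemdrop : ∀ y ∈ pvRemF ft ((pvOrd ft).take r), y ∈ (pvOrd ft).drop r := by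
    intro y hy
    exact (pvRemF_perm ft r).mem_iff.1 hy
  have hpwdrop : ((pvOrd ft).drop r).Pairwise pvLexLe :=
    List.Pairwise.sublist (List.drop_sublist r (pvOrd ft)) (pvOrd_pairwise ft)
  have hle : ∀ y ∈ (pvOrd ft).drop r, pvLexLe ((pvOrd ft)[r]) y ∨ y = (pvOrd ft)[r] := by
    intro y hy
    rw [hdropcons] at hy
    rcases List.mem_cons.1 hy with h | h
    · right; exact h
    · left
      rw [hdropcons] at hpwdrop
      exact (List.pairwise_cons.1 hpwdrop).1 y h
  apply pvMin?_char
  · have : (pvOrd ft)[r] ∈ (pvOrd ft).drop r := by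
      rw [hdropcons]; exact List.mem_cons_self
    exact (pvRemF_perm ft r).mem_iff.2 this
  · exact pvRemF_pairwise_fst ft _
  · intro y hy
    rcases hle y (hmemdrop y hy) with h | h
    · unfold pvLexLe at h; omega
    · rw [h]
  · intro y hy h
    rcases hle y (hmemdrop y hy) with h2 | h2
    · unfold pvLexLe at h2; omega
    · rw [h2]
lemma pvRemF_erase (ft : List Int) (r : Nat) (hr : r < (pvOrd ft).length) :
    (pvRemF ft ((pvOrd ft).take r)).erase ((pvOrd ft)[r]) = pvRemF ft ((pvOrd ft).take (r + 1)) := by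
  have hnd : (pvRemF ft ((pvOrd ft).take r)).Nodup :=
    List.Nodup.sublist List.filter_sublist (pvE_nodup ft)
  rw [hnd.erase_eq_filter]
  unfold pvRemF
  rw [List.filter_filter]
  apply List.filter_congr
  intro x _
  rw [List.take_succ, List.getElem?_eq_getElem hr]
  simp only [Option.toList_some, List.contains_append]
  cases hc : ((pvOrd ft).take r).contains x <;>
    cases he : x == (pvOrd ft)[r] <;> simp_all [bne]
lemma pvRemF_len (ft : List Int) (r : Nat) :
    (pvRemF ft ((pvOrd ft).take r)).length = (pvOrd ft).length - r := by
  rw [(pvRemF_perm ft r).length_eq, List.length_drop]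
lemma pvRemF_sum (ft : List Int) (r : Nat) :
    pvSumVals (pvRemF ft ((pvOrd ft).take r)) = ((pvSortedVals ft).drop r).sum := by
  unfold pvSumVals
  rw [List.Perm.sum_eq (((pvRemF_perm ft r)).map Prod.snd)]
  rw [List.map_drop, ← pvOrd_snd]
lemma pvRemF_nil (ft : List Int) : pvRemF ft [] = pvE ft := by
  unfold pvRemF; simp
lemma pvT0_succ (n r : Nat) : pvT0 n (r + 1) = pvT0 n r + ((n : Int) - (r : Int)) := by
  unfold pvT0; rw [List.range_succ]; simp
lemma pvT0_nonneg (n r : Nat) (h : r ≤ n) : 0 ≤ pvT0 n r := by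
  induction r with
  | zero => simp [pvT0]
  | succ r ih =>
    rw [pvT0_succ]
    have := ih (by omega)
    have : (r : Int) < (n : Int) := by exact_mod_cast Nat.lt_of_lt_of_le (Nat.lt_succ_self r) h
    omega

-- the removal phase, run jointly through A's while-branch and B's for-loop
lemma pvPhase1_run (ft : List Int) (k : Int) (hk : 0 ≤ k) :
    ∀ (rest done : List (Int × Int)) (time : Int),
    pvOrd ft = done ++ rest →
    (∀ i, i < done.length → k < pvSumVals (pvRemF ft ((pvOrd ft).take i))) →
    ∃ r : Nat, done.length ≤ r ∧ r ≤ (pvOrd ft).length ∧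
      pvPhase1B k (ft.length : Int) rest time (pvSumVals (pvRemF ft done)) done
        = (time + (pvT0 ft.length r - pvT0 ft.length done.length), (pvOrd ft).take r) ∧
      (∀ i, i < r → k < pvSumVals (pvRemF ft ((pvOrd ft).take i))) ∧
      pvSumVals (pvRemF ft ((pvOrd ft).take r)) ≤ k ∧
      (∀ g : Nat, pvLoopA k ((r - done.length) + g) (pvRemF ft done) time
        = pvLoopA k g (pvRemF ft ((pvOrd ft).take r)) (time + (pvT0 ft.length r - pvT0 ft.length done.length))) := by
  intro rest
  induction rest with
  | nil =>
    intro done time hORD hmin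
    have hdone : (pvOrd ft).take done.length = done := by
      rw [hORD, List.append_nil, List.take_length]
    have hlen : done.length = (pvOrd ft).length := by rw [hORD]; simp
    refine ⟨done.length, le_refl _, by omega, ?_, hmin, ?_, ?_⟩
    · show (time, done) = _
      rw [sub_self, add_zero, hdone]
    · rw [pvRemF_sum]
      have hslen : (pvSortedVals ft).length = (pvOrd ft).length := by
        rw [pvOrd_snd]; simp
      rw [List.drop_eq_nil_of_le (by omega)]
      simpa using hk
    · intro g
      rw [Nat.sub_self, Nat.zero_add, hdone, sub_self, add_zero]
  | cons p rest' ih =>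
    intro done time hORD hmin
    have hdone : (pvOrd ft).take done.length = done := by
      rw [hORD, List.take_left]
    by_cases hsk : pvSumVals (pvRemF ft done) ≤ k
    · refine ⟨done.length, le_refl _, by rw [hORD]; simp, ?_, hmin,
        by rw [hdone]; exact hsk, ?_⟩
      · show pvPhase1B k (ft.length : Int) (p :: rest') time (pvSumVals (pvRemF ft done)) done = _
        unfold pvPhase1B
        rw [if_pos hsk, sub_self, add_zero, hdone]
      · intro g
        rw [Nat.sub_self, Nat.zero_add, hdone, sub_self, add_zero]
    · push Not at hsk
      have hlt : done.length < (pvOrd ft).length := by rw [hORD]; simp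
      have hp : (pvOrd ft)[done.length]'hlt = p := by
        simp_rw [hORD]
        rw [List.getElem_append_right (by omega)]
        simp
      have hminp : PySem.List.min? (pvRemF ft done) (fun x => x.2) = some p := by
        have h := pvRemF_min ft done.length hlt
        rw [hdone, hp] at h
        exact h
      have herase : (pvRemF ft done).erase p = pvRemF ft ((pvOrd ft).take (done.length + 1)) := by
        have h := pvRemF_erase ft done.length hlt
        rw [hdone, hp] at h
        exact h
      have hlenL : (pvRemF ft done).length = (pvOrd ft).length - done.length := by
        have h := pvRemF_len ft done.length
        rw [hdone] at h
        exact h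
      have hordlen : (pvOrd ft).length = ft.length := by
        rw [(pvOrd_perm ft).length_eq]
        exact pvEnum_len ft 0
      have htake1 : (pvOrd ft).take (done.length + 1) = done ++ [p] := by
        rw [List.take_succ, hdone, List.getElem?_eq_getElem hlt, hp]
        simp
      have hsum' : pvSumVals (pvRemF ft (done ++ [p])) = pvSumVals (pvRemF ft done) - p.2 := by
        rw [← htake1, ← herase]
        have hpmem : p ∈ pvRemF ft done := PySem.List.min?_mem hminp
        have hperm := List.perm_cons_erase hpmem
        have hval : pvSumVals (pvRemF ft done) = p.2 + pvSumVals ((pvRemF ft done).erase p) := by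
          unfold pvSumVals
          rw [List.Perm.sum_eq (hperm.map (fun x => x.2))]
          simp
        omega
      obtain ⟨r, hr1, hr2, hB, hmin2, hsum2, hloop⟩ :=
        ih (done ++ [p]) (time + ((ft.length : Int) - (done.length : Int)))
          (by rw [hORD]; simp)
          (by intro i hi
              simp only [List.length_append, List.length_cons, List.length_nil] at hi
              rcases Nat.lt_or_ge i done.length with h | h
              · exact hmin i h
              · have hieq : i = done.length := by omega
                subst hieq
                rw [hdone]
                exact hsk)
      simp only [List.length_append, List.length_cons, List.length_nil] at hr1 hB hloop
      refine ⟨r, by omega, hr2, ?_, hmin2, hsum2, ?_⟩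
      · show pvPhase1B k (ft.length : Int) (p :: rest') time (pvSumVals (pvRemF ft done)) done = _
        unfold pvPhase1B
        rw [if_neg (by omega)]
        rw [show pvSumVals (pvRemF ft done) - p.2 = pvSumVals (pvRemF ft (done ++ [p])) from by omega]
        rw [hB]
        rw [Prod.mk.injEq]
        refine ⟨?_, rfl⟩
        rw [pvT0_succ]
        ring
      · intro g
        have hstep : (r - done.length) + g = ((r - (done.length + 1)) + g) + 1 := by omega
        rw [hstep]
        simp only [pvLoopA]
        rw [if_pos (by omega : pvSumVals (pvRemF ft done) > k)]
        rw [hminp]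
        show pvLoopA k ((r - (done.length + 1)) + g) ((pvRemF ft done).erase p)
            (time + ((pvRemF ft done).length : Int)) = _
        rw [herase, htake1, hlenL]
        rw [show (((pvOrd ft).length - done.length : Nat) : Int)
            = (ft.length : Int) - (done.length : Int) from by
          rw [Nat.cast_sub (le_of_lt hlt)]
          rw [hordlen]]
        rw [hloop g]
        congr 1
        rw [pvT0_succ]
        ring

-- the inner for-pass of A
lemma pvPassA_ret (k : Int) : ∀ (j : Nat) (L : List (Int × Int)) (time : Int), j < L.length → k = time + (j : Int) →
    pvPassA k L time = .inl (match L[j]? with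
      | some p => if p.2 ≤ 0 then -1 else p.1 + 1
      | none => 0) := by
  intro j
  induction j with
  | zero =>
    intro L time hlt hk
    cases L with
    | nil => simp at hlt
    | cons p rest =>
      simp only [pvPassA]
      rw [if_pos (by omega : time = k)]
      simp
  | succ j ih =>
    intro L time hlt hk
    cases L with
    | nil => simp at hlt
    | cons p rest =>
      simp only [pvPassA]
      rw [if_neg (by push_cast at hk; omega : ¬ time = k)]
      rw [ih rest (time + 1) (by simpa using hlt) (by push_cast at hk ⊢; omega)]
      simp
lemma pvPassA_cont (k : Int) : ∀ (L : List (Int × Int)) (time : Int), time + (L.length : Int) ≤ k →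
    pvPassA k L time = .inr (pvStep L, time + (L.length : Int)) := by
  intro L
  induction L with
  | nil => intro time h; simp [pvPassA, pvStep]
  | cons p rest ih =>
    intro time h
    simp only [List.length_cons] at h
    simp only [pvPassA]
    rw [if_neg (by push_cast at h ⊢; omega : ¬ time = k)]
    rw [ih (time + 1) (by push_cast at h ⊢; omega)]
    simp only [pvStep, List.filterMap_cons]
    by_cases h2 : p.2 - 1 = 0
    · simp only [if_pos h2, if_pos (show p.2 = 1 from by omega)]
      rw [Sum.inr.injEq, Prod.mk.injEq]
      exact ⟨rfl, by push_cast [List.length_cons]; omega⟩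
    · simp only [if_neg h2, if_neg (show ¬ p.2 = 1 from by omega)]
      rw [Sum.inr.injEq, Prod.mk.injEq]
      exact ⟨rfl, by push_cast [List.length_cons]; omega⟩

-- the round-robin model of the second phase
lemma pvModel_zero (rem : List (Int × Int)) : pvModel rem 0 = rem := by
  unfold pvModel
  simp only [Nat.cast_zero]
  induction rem with
  | nil => rfl
  | cons p t ih =>
    rw [List.filterMap_cons]
    rw [if_pos (by omega : p.2 ≤ 0 ∨ (0 : Int) < p.2)]
    simp only [sub_zero] at ih ⊢
    rw [ih, Prod.mk.eta]
lemma pvStep_model (rem : List (Int × Int)) (b : Nat) : pvStep (pvModel rem b) = pvModel rem (b + 1) := by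
  induction rem with
  | nil => rfl
  | cons p t ih =>
    simp only [pvModel, pvStep, List.filterMap_cons] at ih ⊢
    by_cases h1 : p.2 ≤ 0 ∨ (b : Int) < p.2
    · rw [if_pos h1]
      simp only [List.filterMap_cons]
      by_cases h2 : p.2 - (b : Int) = 1
      · have h3 : ¬ (p.2 ≤ 0 ∨ ((b + 1 : Nat) : Int) < p.2) := by push_cast; omega
        rw [if_pos (by omega : p.2 - (b:Int) = 1), if_neg h3]
        exact ih
      · have h3 : p.2 ≤ 0 ∨ ((b + 1 : Nat) : Int) < p.2 := by push_cast; omega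
        rw [if_neg (by omega : ¬ (p.2 - (b:Int) = 1)), if_pos h3]
        rw [show p.2 - (b : Int) - 1 = p.2 - ((b + 1 : Nat) : Int) from by push_cast; ring]
        rw [ih]
    · rw [if_neg h1]
      have h3 : ¬ (p.2 ≤ 0 ∨ ((b + 1 : Nat) : Int) < p.2) := by push_cast at h1 ⊢; omega
      rw [if_neg h3]
      exact ih
lemma pvSum_step (L : List (Int × Int)) : pvSumVals (pvStep L) = pvSumVals L - (L.length : Int) := by
  induction L with
  | nil => simp [pvSumVals, pvStep]
  | cons p t ih =>
    simp only [pvStep, pvSumVals, List.filterMap_cons, List.map_cons, List.sum_cons,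
      List.length_cons] at ih ⊢
    by_cases h2 : p.2 = 1
    · rw [if_pos h2]
      push_cast
      omega
    · rw [if_neg h2]
      simp only [List.map_cons, List.sum_cons]
      push_cast
      omega
lemma pvModel_len (rem : List (Int × Int)) (b : Nat) :
    (pvModel rem b).length = (rem.countP (fun p => decide (p.2 ≤ 0))) + (rem.countP (fun p => decide ((b : Int) < p.2))) := by
  induction rem with
  | nil => rfl
  | cons p t ih =>
    simp only [pvModel, List.filterMap_cons, List.countP_cons] at ih ⊢
    by_cases hA : p.2 ≤ 0 <;> by_cases hB : (b : Int) < p.2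
    · exact absurd hA (by omega)
    · rw [if_pos (Or.inl hA)]; simp [hA, hB, ih]; omega
    · rw [if_pos (Or.inr hB)]; simp [hA, hB, ih]; omega
    · rw [if_neg (by tauto)]; simp [hA, hB, ih]
lemma pvModel_len_anti (rem : List (Int × Int)) {b b' : Nat} (h : b ≤ b') :
    (pvModel rem b').length ≤ (pvModel rem b).length := by
  rw [pvModel_len, pvModel_len]
  have : rem.countP (fun p => decide ((b' : Int) < p.2)) ≤ rem.countP (fun p => decide ((b : Int) < p.2)) := by
    apply List.countP_mono_left
    intro p _ hp
    simp at hp ⊢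
    omega
  omega
lemma pvTB_succ (rem : List (Int × Int)) (t0 : Int) (b : Nat) :
    pvTB rem t0 (b + 1) = pvTB rem t0 b + ((pvModel rem b).length : Int) := by
  unfold pvTB
  rw [List.range_succ]
  simp [add_assoc]
lemma pvTB_mono (rem : List (Int × Int)) (t0 : Int) {b b' : Nat} (h : b ≤ b') :
    pvTB rem t0 b ≤ pvTB rem t0 b' := by
  induction b' with
  | zero => have : b = 0 := by omega
            subst this; exact le_refl _
  | succ n ih =>
    rcases Nat.lt_or_ge b (n+1) with h2 | h2
    · have := ih (by omega)
      rw [pvTB_succ]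
      have hlen : (0:Int) ≤ ((pvModel rem n).length : Int) := by positivity
      omega
    · have : b = n + 1 := by omega
      subst this; exact le_refl _
lemma pvTB_zero (rem : List (Int × Int)) (t0 : Int) : pvTB rem t0 0 = t0 := by
  simp [pvTB]
lemma pvTB_lb (rem : List (Int × Int)) (t0 : Int) (B : Nat)
    (h : ∀ b, b < B → 1 ≤ (pvModel rem b).length) : t0 + (B : Int) ≤ pvTB rem t0 B := by
  induction B with
  | zero => simp [pvTB_zero]
  | succ n ih =>
    rw [pvTB_succ]
    have h1 := ih (fun b hb => h b (by omega))
    have h2 := h n (by omega)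
    have : (1 : Int) ≤ ((pvModel rem n).length : Int) := by exact_mod_cast h2
    push_cast
    omega
-- the invariant: each round spends one second per still-present food
lemma pvTB_inv (rem : List (Int × Int)) (t0 : Int) (b : Nat) :
    pvTB rem t0 b + pvSumVals (pvModel rem b) = t0 + pvSumVals rem := by
  induction b with
  | zero => rw [pvTB_zero, pvModel_zero]
  | succ n ih =>
    rw [pvTB_succ, ← pvStep_model, pvSum_step]
    omega
lemma pvModel_empty (rem : List (Int × Int)) (b : Nat)
    (h : ∀ p ∈ rem, 0 < p.2 ∧ p.2 ≤ (b : Int)) : pvModel rem b = [] := by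
  unfold pvModel
  rw [List.filterMap_eq_nil_iff]
  intro p hp
  rw [if_neg (by have := h p hp; omega)]
lemma pvModel_mem_nonpos (rem : List (Int × Int)) (p : Int × Int) (hp : p ∈ rem) (h0 : p.2 ≤ 0) :
    ∀ b : Nat, (p.1, p.2 - (b : Int)) ∈ pvModel rem b := by
  intro b
  unfold pvModel
  rw [List.mem_filterMap]
  exact ⟨p, hp, by rw [if_pos (Or.inl h0)]⟩

-- the second phase, A's side: the loop returns the answer read off pvModel at pass Bstar
lemma pvPhase2_run (k : Int) (rem : List (Int × Int)) (t0 : Int) (Bstar : Nat) (ans : Int)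
    (h1 : pvTB rem t0 Bstar ≤ k) (h2 : k < pvTB rem t0 Bstar + ((pvModel rem Bstar).length : Int))
    (hans : ans = (match (pvModel rem Bstar)[(k - pvTB rem t0 Bstar).toNat]? with
                   | some p => if p.2 ≤ 0 then -1 else p.1 + 1
                   | none => 0)) :
    ∀ (d b f : Nat), b + d = Bstar → pvSumVals (pvModel rem b) ≤ k → d < f →
      pvLoopA k f (pvModel rem b) (pvTB rem t0 b) = ans := by
  intro d
  induction d with
  | zero =>
    intro b f hb hsum hf
    have hbB : b = Bstar := by omega
    subst hbB
    obtain ⟨f', rfl⟩ : ∃ f', f = f' + 1 := ⟨f - 1, by omega⟩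
    simp only [pvLoopA]
    rw [if_neg (by omega : ¬ pvSumVals (pvModel rem b) > k)]
    have hcast : ((k - pvTB rem t0 b).toNat : Int) = k - pvTB rem t0 b :=
      Int.toNat_of_nonneg (by omega)
    have hj : (k - pvTB rem t0 b).toNat < (pvModel rem b).length := by omega
    rw [pvPassA_ret k (k - pvTB rem t0 b).toNat (pvModel rem b) (pvTB rem t0 b) hj (by omega)]
    rw [hans]
  | succ d ih =>
    intro b f hb hsum hf
    obtain ⟨f', rfl⟩ : ∃ f', f = f' + 1 := ⟨f - 1, by omega⟩
    simp only [pvLoopA]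
    rw [if_neg (by omega : ¬ pvSumVals (pvModel rem b) > k)]
    have hcont : pvTB rem t0 b + ((pvModel rem b).length : Int) ≤ k := by
      rw [← pvTB_succ]
      calc pvTB rem t0 (b + 1) ≤ pvTB rem t0 Bstar := pvTB_mono rem t0 (by omega)
        _ ≤ k := h1
    rw [pvPassA_cont k (pvModel rem b) (pvTB rem t0 b) hcont]
    have hsum' : pvSumVals (pvModel rem (b + 1)) ≤ k := by
      rw [← pvStep_model, pvSum_step]
      have : (0:Int) ≤ ((pvModel rem b).length : Int) := by positivity
      omega
    have := ih (b + 1) f' (by omega) hsum' (by omega)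
    rw [pvStep_model, ← pvTB_succ]
    exact this

-- the second phase, B's side: the round loop stops at pass Bstar
lemma pvPhase2B_run (k : Int) (rem : List (Int × Int)) (t0 : Int) (Bstar : Nat)
    (h1 : pvTB rem t0 Bstar ≤ k) (h2 : k < pvTB rem t0 Bstar + ((pvModel rem Bstar).length : Int)) :
    ∀ (d b f : Nat), b + d = Bstar → d < f →
      pvPhase2B k f (pvModel rem b) (pvTB rem t0 b) = (pvModel rem Bstar, pvTB rem t0 Bstar) := by
  intro d
  induction d with
  | zero =>
    intro b f hb hf
    have hbB : b = Bstar := by omega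
    subst hbB
    obtain ⟨f', rfl⟩ : ∃ f', f = f' + 1 := ⟨f - 1, by omega⟩
    simp only [pvPhase2B]
    rw [if_neg (by omega)]
  | succ d ih =>
    intro b f hb hf
    obtain ⟨f', rfl⟩ : ∃ f', f = f' + 1 := ⟨f - 1, by omega⟩
    simp only [pvPhase2B]
    have hcont : pvTB rem t0 b + ((pvModel rem b).length : Int) ≤ k := by
      rw [← pvTB_succ]
      calc pvTB rem t0 (b + 1) ≤ pvTB rem t0 Bstar := pvTB_mono rem t0 (by omega)
        _ ≤ k := h1
    rw [if_pos hcont]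
    have hstep : (pvModel rem b).filterMap (fun p => if p.2 = 1 then none else some (p.1, p.2 - 1))
        = pvModel rem (b + 1) := pvStep_model rem b
    rw [hstep, ← pvTB_succ]
    exact ih (b + 1) f' (by omega) (by omega)

-- ===== VERDICT (by name: the statement is the Claim_ definition above) =====
theorem solution_spec : Claim_equal_solution := by
  intro ft k hdom hpre
  unfold Spec_solution
  obtain ⟨hk, rP, hrmem, hrsum, hrminl, hrt0, hrdisj⟩ := hpre
  -- run the removal phase
  obtain ⟨r, _, hr2, hB, hminA, hsumA, hloop⟩ :=
    pvPhase1_run ft k hk (pvOrd ft) [] 0 (by simp) (by intro i hi; simp at hi)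
  have hordlen : (pvOrd ft).length = ft.length := by
    rw [(pvOrd_perm ft).length_eq]; exact pvEnum_len ft 0
  have hslen : (pvSortedVals ft).length = ft.length := by
    rw [pvOrd_snd, List.length_map, hordlen]
  -- r agrees with the r of Pre_
  have hrr : r = rP := by
    rcases Nat.lt_trichotomy r rP with h | h | h
    · have h1 := hrminl r h
      have h2 := hsumA
      rw [pvRemF_sum] at h2
      omega
    · exact h
    · have h1 := hminA rP h
      rw [pvRemF_sum] at h1
      omega
  subst hrr
  set rem := pvRemF ft ((pvOrd ft).take r) with hremdef
  set t0 := pvT0 ft.length r with ht0def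
  have hT00 : pvT0 ft.length 0 = 0 := by simp [pvT0]
  have hsum0 : pvSumVals (pvRemF ft []) = ft.sum := by
    rw [pvRemF_nil]
    show ((pvE ft).map (fun x => x.2)).sum = ft.sum
    rw [show ((pvE ft).map (fun x => x.2))
        = ((PySem.List.enumerate ft 0).map Prod.snd) from rfl, pvEnum_snd ft 0]
  have hB' : pvPhase1B k (ft.length : Int) (pvOrd ft) 0 ft.sum [] = (t0, (pvOrd ft).take r) := by
    rw [← hsum0]
    rw [hB]
    simp [hT00]
  -- remaining values and their sums
  have hremperm : (rem.map Prod.snd).Perm ((pvSortedVals ft).drop r) := by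
    rw [pvOrd_snd, ← List.map_drop]
    exact (pvRemF_perm ft r).map Prod.snd
  have hremsum : pvSumVals rem = ((pvSortedVals ft).drop r).sum := pvRemF_sum ft r
  have hnonpos_iff : (∃ v ∈ (pvSortedVals ft).drop r, v ≤ 0) ↔ (∃ p ∈ rem, p.2 ≤ 0) := by
    constructor
    · rintro ⟨v, hv, hv0⟩
      have : v ∈ rem.map Prod.snd := hremperm.mem_iff.2 hv
      obtain ⟨p, hp, rfl⟩ := List.mem_map.1 this
      exact ⟨p, hp, hv0⟩
    · rintro ⟨p, hp, hp0⟩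
      exact ⟨p.2, hremperm.mem_iff.1 (List.mem_map_of_mem hp), hp0⟩
  have ht00 : 0 ≤ t0 := by
    rw [ht0def]
    exact pvT0_nonneg ft.length r (by omega)
  -- the round-robin phase eventually reaches second k: ∃ b, k < pvTB rem t0 (b+1)
  have hex : ∃ b : Nat, k < pvTB rem t0 (b + 1) := by
    by_cases hnp : ∃ p ∈ rem, p.2 ≤ 0
    · obtain ⟨p, hp, hp0⟩ := hnp
      have hlen1 : ∀ b : Nat, 1 ≤ (pvModel rem b).length := by
        intro b
        have := pvModel_mem_nonpos rem p hp hp0 b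
        exact List.length_pos_of_mem this
      refine ⟨(k - t0).toNat, ?_⟩
      have := pvTB_lb rem t0 ((k - t0).toNat + 1) (fun b _ => hlen1 b)
      have hc : ((((k - t0).toNat + 1 : Nat)) : Int) = (k - t0) + 1 := by
        push_cast
        rw [Int.toNat_of_nonneg (by omega)]
      omega
    · have hallpos : ∀ p ∈ rem, 0 < p.2 := by
        intro p hp
        by_contra hc
        exact hnp ⟨p, hp, by omega⟩
      have hklt : k < t0 + pvSumVals rem := by
        rcases hrdisj with h | h
        · exact absurd (hnonpos_iff.1 h) hnp
        · rw [hremsum]; exact h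
      have hle_sum : ∀ p ∈ rem, p.2 ≤ pvSumVals rem := by
        intro p hp
        unfold pvSumVals
        exact List.single_le_sum (fun v hv => by
            obtain ⟨q, hq, rfl⟩ := List.mem_map.1 hv
            exact le_of_lt (hallpos q hq)) p.2 (List.mem_map_of_mem hp)
      set b0 : Nat := (pvSumVals rem).toNat with hb0
      have hb0c : ((b0 : Nat) : Int) = pvSumVals rem := by
        rw [hb0]
        apply Int.toNat_of_nonneg
        omega
      have hempty : pvModel rem b0 = [] := by
        apply pvModel_empty
        intro p hp
        exact ⟨hallpos p hp, by rw [hb0c]; exact hle_sum p hp⟩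
      have hTb0 : pvTB rem t0 b0 = t0 + pvSumVals rem := by
        have := pvTB_inv rem t0 b0
        rw [hempty] at this
        simpa [pvSumVals] using this
      have hb0pos : 1 ≤ b0 := by
        have : 0 < pvSumVals rem := by omega
        omega
      refine ⟨b0 - 1, ?_⟩
      rw [show b0 - 1 + 1 = b0 from by omega, hTb0]
      omega
  set Bstar : Nat := Nat.find hex with hBdef
  have hP : k < pvTB rem t0 (Bstar + 1) := Nat.find_spec hex
  have h1 : pvTB rem t0 Bstar ≤ k := by
    cases hBcase : Bstar with
    | zero => rw [pvTB_zero]; omega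
    | succ m =>
      have := Nat.find_min hex (show m < Bstar from by omega)
      omega
  have h2 : k < pvTB rem t0 Bstar + ((pvModel rem Bstar).length : Int) := by
    rw [← pvTB_succ]
    exact hP
  -- every round before Bstar is nonempty, so Bstar ≤ k
  have hlenpos : ∀ b, b < Bstar → 1 ≤ (pvModel rem b).length := by
    intro b hb
    by_contra hc
    have hz : (pvModel rem b).length = 0 := by omega
    have hzB : (pvModel rem Bstar).length = 0 := by
      have := pvModel_len_anti rem (le_of_lt hb)
      omega
    have := pvTB_mono rem t0 (le_of_lt hb)
    rw [hzB] at h2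
    simp at h2
    omega
  have hBk : (Bstar : Int) ≤ k := by
    have := pvTB_lb rem t0 Bstar hlenpos
    omega
  -- evaluate B down to the element at second k
  have hfin : pvPhase2B k (k.toNat + 1) rem t0 = (pvModel rem Bstar, pvTB rem t0 Bstar) := by
    have := pvPhase2B_run k rem t0 Bstar h1 h2 Bstar 0 (k.toNat + 1) (by omega) (by omega)
    rw [pvModel_zero, pvTB_zero] at this
    exact this
  have hidx0 : 0 ≤ k - pvTB rem t0 Bstar := by omega
  have hidxlt : (k - pvTB rem t0 Bstar).toNat < (pvModel rem Bstar).length := by omega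
  have hget : PySem.List.pyGet? (pvModel rem Bstar) (k - pvTB rem t0 Bstar)
      = some ((pvModel rem Bstar)[(k - pvTB rem t0 Bstar).toNat]'hidxlt) := by
    conv_lhs => rw [show k - pvTB rem t0 Bstar
        = (((k - pvTB rem t0 Bstar).toNat : Nat) : Int) from (Int.toNat_of_nonneg hidx0).symm]
    rw [PySem.List.pyGet?_natCast]
    exact List.getElem?_eq_getElem hidxlt
  have hBalt : solution_alt ft k
      = (match (pvModel rem Bstar)[(k - pvTB rem t0 Bstar).toNat]? with
         | some p => if p.2 ≤ 0 then -1 else p.1 + 1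
         | none => 0) := by
    show (match PySem.List.pyGet?
        (pvPhase2B k (k.toNat + 1)
          ((pvE ft).filter (fun p => !((pvPhase1B k (ft.length : Int)
            (PySem.List.sorted2 (pvE ft) (fun p => p.2) (fun p => p.1) false) 0 ft.sum []).2.contains p)))
          (pvPhase1B k (ft.length : Int)
            (PySem.List.sorted2 (pvE ft) (fun p => p.2) (fun p => p.1) false) 0 ft.sum []).1).1
        (k - (pvPhase2B k (k.toNat + 1)
          ((pvE ft).filter (fun p => !((pvPhase1B k (ft.length : Int)
            (PySem.List.sorted2 (pvE ft) (fun p => p.2) (fun p => p.1) false) 0 ft.sum []).2.contains p)))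
          (pvPhase1B k (ft.length : Int)
            (PySem.List.sorted2 (pvE ft) (fun p => p.2) (fun p => p.1) false) 0 ft.sum []).1).2) with
       | none => (0 : Int)
       | some pv => if pv.2 ≤ 0 then -1 else pv.1 + 1) = _
    rw [show PySem.List.sorted2 (pvE ft) (fun p => p.2) (fun p => p.1) false = pvOrd ft from rfl]
    rw [hB']
    rw [show (pvE ft).filter (fun p => !(((t0, (pvOrd ft).take r) : Int × List (Int × Int)).2.contains p)) = rem from rfl]
    rw [hfin]
    simp only
    rw [hget, List.getElem?_eq_getElem hidxlt]
  -- run A's loop: the removal phase by hloop, the round-robin phase by pvPhase2_run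
  have hrun := pvPhase2_run k rem t0 Bstar (solution_alt ft k) h1 h2 hBalt Bstar 0
    (ft.length + k.toNat + 2 - r) (by omega)
    (by rw [pvModel_zero]; exact hsumA)
    (by omega)
  show pvLoopA k (ft.length + k.toNat + 2) (PySem.List.enumerate ft) 0 = solution_alt ft k
  have hfuel : ft.length + k.toNat + 2
      = (r - ([] : List (Int × Int)).length) + (ft.length + k.toNat + 2 - r) := by
    simp only [List.length_nil]
    omega
  rw [hfuel]
  have hloop0 := hloop (ft.length + k.toNat + 2 - r)
  rw [pvRemF_nil] at hloop0
  rw [show PySem.List.enumerate ft = pvE ft from rfl, hloop0]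
  rw [show (0 + (t0 - pvT0 ft.length ([] : List (Int × Int)).length)) = pvTB rem t0 0 from by
    simp [pvTB_zero, hT00]]
  rw [show rem = pvModel rem 0 from (pvModel_zero rem).symm]
  exact hrun
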